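-- pv_equiv track=rewrite | github.com/DrobitSan/Ejercicios-Python | Ejercicios/Matriz_inversa.py | menor_complementario3
-- ===== SOURCE A (Python) =====
-- def determinante_2(matriz):
--     det= matriz[0][0]*matriz[1][1] - matriz[0][1]*matriz[1][0]
--     return det
--
-- def menor_complementario3(A,i,j):
--     nueva=[]
--     n=-1
--     for x in range(3):
--         if x != i:
--             nueva.append([])
--             n+=1
--             for y in range(3):
--                 if y != j:
--                     nueva[n].append(A[x][y])
--     return determinante_2(nueva)
-- ===== SOURCE B (Python) =====
-- def menor_complementario3(A, i, j):
--     # Leibniz expansion: sum of signed permutation products over the first two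
--     # surviving row/column indices, accumulated in a loop.
--     rows = [x for x in range(3) if x != i][:2]
--     cols = [y for y in range(3) if y != j][:2]
--     det = 0
--     for perm, sign in (([0, 1], 1), ([1, 0], -1)):
--         prod = sign
--         for k in range(2):
--             prod *= A[rows[k]][cols[perm[k]]]
--         det += prod
--     return det
-- ===== Notes on version B (the rewrite author's own statement) =====
-- stated objective: alternative
-- what changed: B computes the minor by the Leibniz permutation expansion (a loop over signed permutations accumulating products over the two surviving row/column indices) instead of materialising a nested 2x2 minor list and passing it to a determinant helper.
import Mathlib
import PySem

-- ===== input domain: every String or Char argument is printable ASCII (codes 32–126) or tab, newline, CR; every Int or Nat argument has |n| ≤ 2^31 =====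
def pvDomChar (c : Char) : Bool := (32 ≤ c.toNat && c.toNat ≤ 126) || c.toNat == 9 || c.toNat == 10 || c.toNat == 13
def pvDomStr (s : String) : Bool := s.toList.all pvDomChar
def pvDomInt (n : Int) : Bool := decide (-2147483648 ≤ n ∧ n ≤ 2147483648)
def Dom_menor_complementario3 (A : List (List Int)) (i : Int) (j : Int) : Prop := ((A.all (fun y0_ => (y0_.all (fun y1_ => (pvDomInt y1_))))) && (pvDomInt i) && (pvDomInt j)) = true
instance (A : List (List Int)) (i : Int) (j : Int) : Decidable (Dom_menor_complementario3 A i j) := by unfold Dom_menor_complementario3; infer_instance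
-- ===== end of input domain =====

-- B replaces A's minor-list construction plus determinant helper by a Leibniz
-- permutation-expansion loop over the surviving indices (objective: alternative).

-- ===== PORT A =====
-- A[x][y]; Pre_ guarantees the accesses are in range, so the out-of-range default 0
-- is never reached on admitted inputs.
def pvIdx (A : List (List Int)) (x y : Int) : Int :=
  ((PySem.List.pyGet? A x).getD []) |> fun r => (PySem.List.pyGet? r y).getD 0

-- the inner loop of A (append each surviving A[x][y] to the current row)
def pvRow (A : List (List Int)) (j : Int) (x : Int) : List Int :=
  (([0, 1, 2] : List Int)).foldl
    (fun row y => if y ≠ j then row ++ [pvIdx A x y] else row) []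

def determinante_2 (matriz : List (List Int)) : Int :=
  pvIdx matriz 0 0 * pvIdx matriz 1 1 - pvIdx matriz 0 1 * pvIdx matriz 1 0

def menor_complementario3 (A : List (List Int)) (i : Int) (j : Int) : Int :=
  -- Python builds nueva by appending an empty row for each surviving x and then
  -- appending each surviving A[x][y] to that (last) row (the inner loop pvRow);
  -- building the row and appending it is the same construction.
  let nueva : List (List Int) :=
    (([0, 1, 2] : List Int)).foldl
      (fun acc x => if x ≠ i then acc ++ [pvRow A j x] else acc) []
  determinante_2 nueva

-- ===== PORT B =====
-- [:2] on a nonnegative-bound slice is List.take 2 (exact here).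
def menor_complementario3_alt (A : List (List Int)) (i : Int) (j : Int) : Int :=
  let rows := ((([0, 1, 2] : List Int)).filter (fun x => x ≠ i)).take 2
  let cols := ((([0, 1, 2] : List Int)).filter (fun y => y ≠ j)).take 2
  ([(([0, 1] : List Int), (1 : Int)), (([1, 0] : List Int), (-1 : Int))]).foldl
    (fun det ps =>
      det + (([0, 1] : List Int)).foldl
        (fun prod k =>
          prod * pvIdx A ((PySem.List.pyGet? rows k).getD 0)
                         ((PySem.List.pyGet? cols ((PySem.List.pyGet? ps.1 k).getD 0)).getD 0))
        ps.2)
    0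

-- ===== PRECONDITION & SPEC =====
-- Pre_: exactly the inputs on which Python A raises no IndexError — every surviving
-- row index x ≠ i in {0,1,2} is in range of A and every surviving column index
-- y ≠ j in {0,1,2} is in range of that row.
def Pre_menor_complementario3 (A : List (List Int)) (i : Int) (j : Int) : Prop :=
  ∀ x ∈ ([0, 1, 2] : List Nat), (x : Int) ≠ i →
    x < A.length ∧ ∀ y ∈ ([0, 1, 2] : List Nat), (y : Int) ≠ j → y < (A[x]?.getD []).length
instance (A : List (List Int)) (i : Int) (j : Int) : Decidable (Pre_menor_complementario3 A i j) := by
  unfold Pre_menor_complementario3; infer_instance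

def pvWitness_menor_complementario3 : List (List Int) × Int × Int :=
  ([[1, 2, 3], [4, 5, 6], [7, 8, 9]], 0, 0)

def Spec_menor_complementario3 (A : List (List Int)) (i : Int) (j : Int) (out : Int) : Prop := out = menor_complementario3_alt A i j
instance (A : List (List Int)) (i : Int) (j : Int) (out : Int) : Decidable (Spec_menor_complementario3 A i j out) := by unfold Spec_menor_complementario3; infer_instance

-- ===== CLAIM (what is proved, stated in full; the proofs are below) =====
def Claim_equal_menor_complementario3 : Prop := ∀ (A : List (List Int)) (i : Int) (j : Int), Dom_menor_complementario3 A i j → Pre_menor_complementario3 A i j → Spec_menor_complementario3 A i j (menor_complementario3 A i j)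

-- ===== LEMMAS AND PROOFS =====

-- A's outer append-if loop builds exactly the filtered list of rows.
lemma pvOuterEq (A : List (List Int)) (i j : Int) :
    (([0, 1, 2] : List Int)).foldl
      (fun acc x => if x ≠ i then acc ++ [pvRow A j x] else acc) []
      = ((([0, 1, 2] : List Int)).filter (fun x => x ≠ i)).map (pvRow A j) := by
  by_cases h0 : (0 : Int) ≠ i <;> by_cases h1 : (1 : Int) ≠ i <;> by_cases h2 : (2 : Int) ≠ i <;>
    simp [List.foldl, List.filter, h0, h1, h2]

-- A's inner append-if loop builds exactly the filtered list of entries of row x.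
lemma pvRowEq (A : List (List Int)) (j x : Int) :
    pvRow A j x = ((([0, 1, 2] : List Int)).filter (fun y => y ≠ j)).map (pvIdx A x) := by
  by_cases h0 : (0 : Int) ≠ j <;> by_cases h1 : (1 : Int) ≠ j <;> by_cases h2 : (2 : Int) ≠ j <;>
    simp [pvRow, List.foldl, List.filter, h0, h1, h2]

-- filtering one value out of [0,1,2] always leaves at least two survivors.
lemma pvFilterShape (i : Int) :
    ∃ a b t, (([0, 1, 2] : List Int)).filter (fun x => x ≠ i) = a :: b :: t := by
  by_cases h0 : (0 : Int) = i <;> by_cases h1 : (1 : Int) = i <;> by_cases h2 : (2 : Int) = i <;>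
    simp_all [List.filter] <;> omega

-- pyGet? at the literal indices 0 and 1 of a list with at least two elements.
lemma pvGet0 {a : Type} (x : a) (l : List a) : PySem.List.pyGet? (x :: l) 0 = some x := by
  simp [PySem.List.pyGet?, PySem.List.pyIdx?]

lemma pvGet1 {a : Type} (x y : a) (l : List a) : PySem.List.pyGet? (x :: y :: l) 1 = some y := by
  simp [PySem.List.pyGet?, PySem.List.pyIdx?]

-- ===== VERDICT (by name: the statement is the Claim_ definition above) =====
theorem menor_complementario3_spec : Claim_equal_menor_complementario3 := by
  intro A i j _ _
  obtain ⟨a, b, t, hR⟩ := pvFilterShape i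
  obtain ⟨c, d, u, hC⟩ := pvFilterShape j
  simp only [Spec_menor_complementario3, menor_complementario3, menor_complementario3_alt]
  rw [pvOuterEq, hR, hC]
  simp only [List.map_cons, List.take, List.foldl, determinante_2, pvIdx, pvRowEq, hC,
    pvGet0, pvGet1, Option.getD_some]
  ring
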